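-- pv_equiv track=rewrite | github.com/veryfansome/germ | bot/lang/tokenizer.py | tokenize_chars_and_labels
-- ===== SOURCE A (Python) =====
-- def tokenize_chars_and_labels(sentence_tokens):
--     """
--     For a single sentence (list of tokens), return:
--       - list of characters (flattened across tokens)
--       - list of B/I/E/S tags (aligned with each character)
--     """
--     chars = []
--     labels = []
--
--     for token in sentence_tokens:
--         if len(token) == 1:
--             # Single-character token => label is S
--             chars.append(token[0])
--             labels.append("S")
--         else:
--             # Multi-character token
--             token_len = len(token)
--             for i, c in enumerate(token):
--                 if i == 0:
--                     chars.append(c)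
--                     labels.append("B")
--                 elif i == token_len - 1:
--                     chars.append(c)
--                     labels.append("E")
--                 else:
--                     chars.append(c)
--                     labels.append("I")
--     return chars, labels
-- ===== SOURCE B (Python) =====
-- def tokenize_chars_and_labels(sentence_tokens):
--     """
--     For a single sentence (list of tokens), return:
--       - list of characters (flattened across tokens)
--       - list of B/I/E/S tags (aligned with each character)
--     """
--     # Stage 1: flatten all characters.
--     chars = [c for token in sentence_tokens for c in token]
--     # Stage 2: record the global start and end offsets of every (non-empty) token.
--     starts = set()
--     ends = set()
--     pos = 0
--     for token in sentence_tokens: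
--         n = len(token)
--         if n > 0:
--             starts.add(pos)
--             ends.add(pos + n - 1)
--             pos += n
--     # Stage 3: classify every global position by boundary membership.
--     labels = []
--     for i in range(len(chars)):
--         if i in starts:
--             labels.append("S" if i in ends else "B")
--         else:
--             labels.append("E" if i in ends else "I")
--     return chars, labels
-- ===== Notes on version B (the rewrite author's own statement) =====
-- stated objective: alternative
-- what changed: B works in three staged passes instead of A's single per-token positional loop: it flattens all characters, collects every token's global start and end offset into two boundary sets, then labels each global position S/B/E/I purely by membership in those sets.
import Mathlib
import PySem

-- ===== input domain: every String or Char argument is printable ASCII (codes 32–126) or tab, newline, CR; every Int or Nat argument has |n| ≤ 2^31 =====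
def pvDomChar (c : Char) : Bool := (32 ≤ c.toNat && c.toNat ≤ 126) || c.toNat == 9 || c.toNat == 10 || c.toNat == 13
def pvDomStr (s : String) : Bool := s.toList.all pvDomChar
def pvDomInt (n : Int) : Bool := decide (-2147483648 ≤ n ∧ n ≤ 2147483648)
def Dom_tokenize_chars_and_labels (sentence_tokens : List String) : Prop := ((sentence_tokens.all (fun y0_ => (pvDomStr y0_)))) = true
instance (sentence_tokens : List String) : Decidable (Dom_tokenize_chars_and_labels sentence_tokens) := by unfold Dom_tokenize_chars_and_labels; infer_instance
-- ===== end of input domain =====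

-- B replaces A's per-token positional loop by three staged passes: flatten the chars,
-- collect token start/end offsets into sets, then classify every global position by
-- boundary-set membership; objective: alternative.


-- ===== PORT A =====
-- inner loop body of A's multi-character branch (i == 0 → B, i == len-1 → E, else I)
def pvInnerA (token_len : Int) (st : List String × List String) (p : Int × Char) :
    List String × List String :=
  if p.1 == 0 then (st.1 ++ [p.2.toString], st.2 ++ ["B"])
  else if p.1 == token_len - 1 then (st.1 ++ [p.2.toString], st.2 ++ ["E"])
  else (st.1 ++ [p.2.toString], st.2 ++ ["I"])

def tokenize_chars_and_labels (sentence_tokens : List String) : List String × List String :=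
  sentence_tokens.foldl
    (fun st token =>
      if PySem.Str.len token == 1 then
        (st.1 ++ [((PySem.Str.pyGet? token 0).map Char.toString).getD ""], st.2 ++ ["S"])
      else
        let token_len := PySem.Str.len token
        (PySem.List.enumerate token.toList 0).foldl (pvInnerA token_len) st)
    ([], [])

-- ===== PORT B =====
-- stage-2 loop body: record a non-empty token's global start and end offset
def pvBoundsStep (acc : PySem.Set Int × PySem.Set Int × Int) (token : String) :
    PySem.Set Int × PySem.Set Int × Int :=
  let n : Int := PySem.Str.len token
  if 0 < n then
    (PySem.Set.add acc.1 acc.2.2, PySem.Set.add acc.2.1 (acc.2.2 + n - 1), acc.2.2 + n)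
  else acc

def tokenize_chars_and_labels_alt (sentence_tokens : List String) : List String × List String :=
  let chars : List String := sentence_tokens.flatMap (fun token => token.toList.map Char.toString)
  let b := sentence_tokens.foldl pvBoundsStep (PySem.Set.empty, PySem.Set.empty, 0)
  let starts := b.1
  let ends := b.2.1
  let labels := (PySem.List.pyRange 0 (chars.length : Int) 1).map (fun i =>
    if PySem.Set.contains starts i then
      (if PySem.Set.contains ends i then "S" else "B")
    else
      (if PySem.Set.contains ends i then "E" else "I"))
  (chars, labels)

-- ===== PRECONDITION & SPEC =====
def Spec_tokenize_chars_and_labels (sentence_tokens : List String) (out : List String × List String) : Prop := out = tokenize_chars_and_labels_alt sentence_tokens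
instance (sentence_tokens : List String) (out : List String × List String) : Decidable (Spec_tokenize_chars_and_labels sentence_tokens out) := by unfold Spec_tokenize_chars_and_labels; infer_instance

-- ===== CLAIM (what is proved, stated in full; the proofs are below) =====
def Claim_equal_tokenize_chars_and_labels : Prop := ∀ (sentence_tokens : List String), Dom_tokenize_chars_and_labels sentence_tokens → Spec_tokenize_chars_and_labels sentence_tokens (tokenize_chars_and_labels sentence_tokens)

-- ===== LEMMAS AND PROOFS =====

-- canonical per-token BIES label block, and the canonical result both ports compute
def pvBlock (n : Nat) : List String :=
  if n = 1 then ["S"]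
  else if n = 0 then []
  else "B" :: (List.replicate (n - 2) "I" ++ ["E"])

def pvCharsOf (ts : List String) : List String :=
  ts.flatMap (fun token => token.toList.map Char.toString)

def pvLabelsOf (ts : List String) : List String :=
  ts.flatMap (fun token => pvBlock token.toList.length)

-- spec-side start/end offset lists of the non-empty tokens, from base offset p
def pvStartOffs : List String → Int → List Int
  | [], _ => []
  | t :: ts, p =>
    if t.toList.length = 0 then pvStartOffs ts p
    else p :: pvStartOffs ts (p + t.toList.length)

def pvEndOffs : List String → Int → List Int
  | [], _ => []
  | t :: ts, p =>
    if t.toList.length = 0 then pvEndOffs ts p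
    else (p + t.toList.length - 1) :: pvEndOffs ts (p + t.toList.length)

def pvTotal (ts : List String) : Int := ((ts.map (fun t => t.toList.length)).sum : Nat)

theorem pvStartOffs_ge (ts : List String) : ∀ (p : Int), ∀ x ∈ pvStartOffs ts p, p ≤ x := by
  induction ts with
  | nil => intro p x hx; simp [pvStartOffs] at hx
  | cons t ts ih =>
    intro p x hx
    by_cases h : t.toList.length = 0
    · simp only [pvStartOffs, if_pos h] at hx; exact ih p x hx
    · simp only [pvStartOffs, if_neg h, List.mem_cons] at hx
      rcases hx with rfl | hx
      · exact le_refl x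
      · have := ih (p + t.toList.length) x hx; omega

theorem pvEndOffs_ge (ts : List String) : ∀ (p : Int), ∀ x ∈ pvEndOffs ts p, p ≤ x := by
  induction ts with
  | nil => intro p x hx; simp [pvEndOffs] at hx
  | cons t ts ih =>
    intro p x hx
    by_cases h : t.toList.length = 0
    · simp only [pvEndOffs, if_pos h] at hx; exact ih p x hx
    · simp only [pvEndOffs, if_neg h, List.mem_cons] at hx
      rcases hx with rfl | hx
      · have : (1 : Int) ≤ t.toList.length := by exact_mod_cast Nat.one_le_iff_ne_zero.mpr h
        omega
      · have := ih (p + t.toList.length) x hx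
        have : (1 : Int) ≤ t.toList.length := by exact_mod_cast Nat.one_le_iff_ne_zero.mpr h
        omega

-- B's stage-2 fold produces exactly the spec offset lists
theorem pvBounds_eq (ts : List String) :
    ∀ (S E : List Int) (p : Int), (∀ x ∈ S, x < p) → (∀ x ∈ E, x < p) →
    ts.foldl pvBoundsStep (S, E, p)
      = (S ++ pvStartOffs ts p, E ++ pvEndOffs ts p, p + pvTotal ts) := by
  induction ts with
  | nil => intro S E p _ _; simp [pvStartOffs, pvEndOffs, pvTotal]
  | cons t ts ih =>
    intro S E p hS hE
    rw [List.foldl_cons]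
    have hlen : PySem.Str.len t = (t.toList.length : Int) := by simp
    by_cases h : t.toList.length = 0
    · have h' : t = "" := by
        have h'' := List.length_eq_zero_iff.mp h
        simpa using h''
      subst h'
      have hn : ¬ (0 : Int) < PySem.Str.len "" := by simp
      simp only [pvBoundsStep, if_neg hn]
      rw [ih S E p hS hE]
      simp [pvStartOffs, pvEndOffs, pvTotal]
    · have h1 : (1 : Int) ≤ t.toList.length := by exact_mod_cast Nat.one_le_iff_ne_zero.mpr h
      have hn : (0 : Int) < PySem.Str.len t := by rw [hlen]; omega
      simp only [pvBoundsStep, if_pos hn]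
      have hlt2 : t.length = t.toList.length := by simp
      have hpS : p ∉ S := fun hm => absurd (hS p hm) (by omega)
      have hpE : p + PySem.Str.len t - 1 ∉ E := fun hm => by
        have := hE _ hm; rw [hlen] at this; omega
      rw [PySem.Set.add_of_not_mem hpS, PySem.Set.add_of_not_mem hpE]
      rw [ih (S ++ [p]) (E ++ [p + PySem.Str.len t - 1]) (p + PySem.Str.len t)
        (by intro x hx; rcases List.mem_append.mp hx with hx | hx
            · have := hS x hx; rw [hlen]; omega
            · simp at hx; subst hx; rw [hlen]; omega)
        (by intro x hx; rcases List.mem_append.mp hx with hx | hx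
            · have := hE x hx; rw [hlen]; omega
            · simp at hx; omega)]
      simp only [pvStartOffs, pvEndOffs, if_neg h, hlen, pvTotal, List.map_cons, List.sum_cons,
        Prod.mk.injEq]
      refine ⟨by simp, by simp, by push_cast; ring⟩

-- the classification of one non-empty token's positions yields its label block
theorem pvSegment_eq (n : Nat) (hn : 1 ≤ n) (f : Int → String) (p : Int)
    (h0 : f p = (if n = 1 then "S" else "B"))
    (hlast : 2 ≤ n → f (p + n - 1) = "E")
    (hmid : ∀ k : Nat, 1 ≤ k → k < n - 1 → f (p + k) = "I") :
    (PySem.List.pyRange p (p + n) 1).map f = pvBlock n := by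
  have hr : PySem.List.pyRange p (p + n) 1 = (List.range n).map (fun (k : Nat) => p + (k : Int)) := by
    rw [PySem.List.pyRange_one, show (p + (n : Int) - p).toNat = n by omega]
  rw [hr, List.map_map]
  rcases Nat.lt_or_ge n 2 with h2 | h2
  · have : n = 1 := by omega
    subst this
    simp only [List.range_one, List.map_cons, List.map_nil, Function.comp_apply,
      Nat.cast_zero, add_zero]
    rw [h0]
    simp [pvBlock]
  · have hblock : pvBlock n = "B" :: (List.replicate (n - 2) "I" ++ ["E"]) := by
      simp only [pvBlock]
      rw [if_neg (by omega), if_neg (by omega)]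
    rw [hblock]
    have hsplit : List.range n = 0 :: ((List.range (n - 2)).map (fun k => k + 1) ++ [n - 1]) := by
      have h1 : List.range n = List.range (n - 1) ++ [n - 1] := by
        conv_lhs => rw [show n = (n - 1) + 1 by omega]
        rw [List.range_succ]
      have h2' : List.range (n - 1) = 0 :: (List.range (n - 2)).map (fun k => k + 1) := by
        conv_lhs => rw [show n - 1 = (n - 2) + 1 by omega]
        rw [List.range_succ_eq_map]
      rw [h1, h2']; simp
    rw [hsplit]
    simp only [List.map_cons, List.map_append, List.map_map, Function.comp]
    rw [show ((0:Nat):Int) = 0 by norm_num]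
    congr 1
    · rw [add_zero, h0, if_neg (by omega)]
    congr 1
    · rw [show List.replicate (n - 2) "I" = (List.range (n - 2)).map (fun _ => "I") by
        rw [List.map_const', List.length_range]]
      apply List.map_congr_left
      intro k hk
      rw [List.mem_range] at hk
      exact hmid (k + 1) (by omega) (by omega)
    · simp only [List.map_nil]
      rw [show p + ((n - 1 : Nat) : Int) = p + n - 1 by omega, hlast h2]

-- B's stage-3 positional classification reproduces the concatenated label blocks
theorem pvLabels_eq (ts : List String) :
    ∀ (S E : List Int) (p : Int), (∀ x ∈ S, x < p) → (∀ x ∈ E, x < p) →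
    (PySem.List.pyRange p (p + pvTotal ts) 1).map (fun i =>
      if PySem.Set.contains (S ++ pvStartOffs ts p) i then
        (if PySem.Set.contains (E ++ pvEndOffs ts p) i then "S" else "B")
      else
        (if PySem.Set.contains (E ++ pvEndOffs ts p) i then "E" else "I"))
    = pvLabelsOf ts := by
  induction ts with
  | nil =>
    intro S E p _ _
    rw [show p + pvTotal [] = p by simp [pvTotal]]
    rw [PySem.List.pyRange_one_eq_nil (le_refl p)]
    simp [pvLabelsOf]
  | cons t ts ih =>
    intro S E p hS hE
    by_cases h : t.toList.length = 0
    · have h' : t = "" := by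
        have h'' := List.length_eq_zero_iff.mp h
        simpa using h''
      subst h'
      rw [show pvTotal ("" :: ts) = pvTotal ts by simp [pvTotal],
        show pvStartOffs ("" :: ts) p = pvStartOffs ts p by simp [pvStartOffs],
        show pvEndOffs ("" :: ts) p = pvEndOffs ts p by simp [pvEndOffs]]
      rw [ih S E p hS hE]
      simp [pvLabelsOf, pvBlock]
    · have h1 : (1 : Nat) ≤ t.toList.length := Nat.one_le_iff_ne_zero.mpr h
      set n : Nat := t.toList.length with hn
      have hc : (t.length : Int) = (n : Int) := by simp [hn]
      have htot : p + pvTotal (t :: ts) = (p + n) + pvTotal ts := by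
        simp [pvTotal]; omega
      have hsplitR : PySem.List.pyRange p (p + pvTotal (t :: ts)) 1
          = PySem.List.pyRange p (p + n) 1 ++ PySem.List.pyRange (p + n) ((p + n) + pvTotal ts) 1 := by
        rw [htot]
        refine PySem.List.pyRange_one_append p (p + n) ((p + n) + pvTotal ts) (by omega) ?_
        have : (0 : Int) ≤ pvTotal ts := by unfold pvTotal; exact Int.natCast_nonneg _
        omega
      simp only [pvStartOffs, pvEndOffs, if_neg h, ← hn]
      have hSfull : S ++ (p :: pvStartOffs ts (p + n)) = (S ++ [p]) ++ pvStartOffs ts (p + n) := by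
        simp
      have hEfull : E ++ ((p + n - 1) :: pvEndOffs ts (p + n))
          = (E ++ [p + n - 1]) ++ pvEndOffs ts (p + n) := by simp
      rw [hsplitR, List.map_append, hSfull, hEfull]
      have hS' : ∀ x ∈ S ++ [p], x < p + n := by
        intro x hx; rcases List.mem_append.mp hx with hx | hx
        · have := hS x hx; omega
        · simp at hx; omega
      have hE' : ∀ x ∈ E ++ [p + n - 1], x < p + n := by
        intro x hx; rcases List.mem_append.mp hx with hx | hx
        · have := hE x hx; omega
        · simp at hx; omega
      rw [ih (S ++ [p]) (E ++ [p + n - 1]) (p + n) hS' hE']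
      have hseg : (PySem.List.pyRange p (p + n) 1).map (fun i =>
          if PySem.Set.contains ((S ++ [p]) ++ pvStartOffs ts (p + n)) i then
            (if PySem.Set.contains ((E ++ [p + n - 1]) ++ pvEndOffs ts (p + n)) i then "S" else "B")
          else
            (if PySem.Set.contains ((E ++ [p + n - 1]) ++ pvEndOffs ts (p + n)) i then "E" else "I"))
          = pvBlock n := by
        have memS : ∀ i : Int, p ≤ i → i < p + n →
            (PySem.Set.contains ((S ++ [p]) ++ pvStartOffs ts (p + n)) i = true ↔ i = p) := by
          intro i hip hin
          simp only [PySem.Set.contains_eq_listContains, List.contains_eq_mem,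
            decide_eq_true_eq, List.mem_append, List.mem_singleton]
          constructor
          · rintro ((hm | rfl) | hm)
            · exact absurd (hS i hm) (by omega)
            · rfl
            · exact absurd (pvStartOffs_ge ts (p + n) i hm) (by omega)
          · rintro rfl; exact Or.inl (Or.inr rfl)
        have memE : ∀ i : Int, p ≤ i → i < p + n →
            (PySem.Set.contains ((E ++ [p + n - 1]) ++ pvEndOffs ts (p + n)) i = true ↔ i = p + n - 1) := by
          intro i hip hin
          simp only [PySem.Set.contains_eq_listContains, List.contains_eq_mem,
            decide_eq_true_eq, List.mem_append, List.mem_singleton]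
          constructor
          · rintro ((hm | rfl) | hm)
            · exact absurd (hE i hm) (by omega)
            · rfl
            · exact absurd (pvEndOffs_ge ts (p + n) i hm) (by omega)
          · rintro rfl; exact Or.inl (Or.inr rfl)
        apply pvSegment_eq n h1 _ p
        · have hmS := (memS p (le_refl p) (by omega)).mpr rfl
          rw [if_pos hmS]
          by_cases hone : n = 1
          · rw [if_pos hone, if_pos ((memE p (le_refl p) (by omega)).mpr (by omega))]
          · rw [if_neg hone]
            rw [if_neg (by
              intro hc
              have := (memE p (le_refl p) (by omega)).mp hc
              omega)]
        · intro h2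
          have hlt : p + (n : Int) - 1 < p + n := by omega
          have hge : p ≤ p + (n : Int) - 1 := by omega
          rw [if_neg (by
            intro hc
            have := (memS _ hge hlt).mp hc
            omega)]
          rw [if_pos ((memE _ hge hlt).mpr rfl)]
        · intro k hk1 hk2
          have hge : p ≤ p + (k : Int) := by omega
          have hlt : p + (k : Int) < p + n := by
            have : (k : Int) < (n : Int) := by exact_mod_cast Nat.lt_of_lt_pred (by omega)
            omega
          rw [if_neg (by
            intro hc
            have := (memS _ hge hlt).mp hc
            omega)]
          rw [if_neg (by
            intro hc
            have := (memE _ hge hlt).mp hc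
            have hkn : (k : Int) = (n : Int) - 1 := by omega
            have : k = n - 1 := by omega
            omega)]
      rw [hseg]
      have hnl : t.length = n := by rw [hn]; simp
      simp [pvLabelsOf, hnl]

-- B computes the canonical result
theorem pvB_eq (ts : List String) :
    tokenize_chars_and_labels_alt ts = (pvCharsOf ts, pvLabelsOf ts) := by
  have hfold := pvBounds_eq ts [] [] 0 (by simp) (by simp)
  have h1 : (List.foldl pvBoundsStep (PySem.Set.empty, PySem.Set.empty, (0 : Int)) ts).1
      = pvStartOffs ts 0 := by
    rw [show (PySem.Set.empty, PySem.Set.empty, (0 : Int))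
        = (([] : List Int), ([] : List Int), (0 : Int)) from rfl, hfold]
    simp
  have h2 : (List.foldl pvBoundsStep (PySem.Set.empty, PySem.Set.empty, (0 : Int)) ts).2.1
      = pvEndOffs ts 0 := by
    rw [show (PySem.Set.empty, PySem.Set.empty, (0 : Int))
        = (([] : List Int), ([] : List Int), (0 : Int)) from rfl, hfold]
    simp
  unfold tokenize_chars_and_labels_alt
  simp only [h1, h2]
  have hlen : ((ts.flatMap (fun token => token.toList.map Char.toString)).length : Int)
      = 0 + pvTotal ts := by
    simp [pvTotal, List.length_flatMap]
  rw [hlen]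
  have hlab := pvLabels_eq ts [] [] 0 (by simp) (by simp)
  simp only [List.nil_append] at hlab
  exact Prod.ext_iff.mpr ⟨rfl, hlab⟩

-- A's inner loop over the tail (indices ≥ 1) appends the chars and 'I…IE' labels.
theorem pvInnerA_tail (l : List Char) :
    ∀ (s : Nat) (st : List String × List String), 1 ≤ s → l ≠ [] →
    (PySem.List.enumerate l (s : Int)).foldl (pvInnerA ((s : Int) + l.length)) st
      = (st.1 ++ l.map Char.toString,
         st.2 ++ (List.replicate (l.length - 1) "I" ++ ["E"])) := by
  induction l with
  | nil => intro _ _ _ h; exact absurd rfl h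
  | cons c rest ih =>
    intro s st hs _
    rw [PySem.List.enumerate_cons, List.foldl_cons]
    by_cases hr : rest = []
    · subst hr
      have hstep : pvInnerA ((s : Int) + ([c] : List Char).length) st ((s : Int), c)
          = (st.1 ++ [c.toString], st.2 ++ ["E"]) := by
        simp [pvInnerA]
        omega
      rw [hstep]
      simp [PySem.List.enumerate]
    · have hlen : (0 : Nat) < rest.length := List.length_pos_iff.mpr hr
      have hstep : pvInnerA ((s : Int) + ((c :: rest) : List Char).length) st ((s : Int), c)
          = (st.1 ++ [c.toString], st.2 ++ ["I"]) := by
        simp only [pvInnerA, beq_iff_eq]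
        rw [if_neg (by omega), if_neg (by simp; omega)]
      rw [hstep]
      have harg : ((s : Int) + ((c :: rest) : List Char).length)
          = (((s + 1 : Nat) : Int) + rest.length) := by
        simp; omega
      have hcast : (((s : Int)) + 1) = (((s + 1 : Nat)) : Int) := by push_cast; ring
      rw [harg, hcast, ih (s + 1) _ (by omega) hr]
      have hR : List.replicate rest.length "I" = "I" :: List.replicate (rest.length - 1) "I" := by
        conv_lhs => rw [show rest.length = (rest.length - 1) + 1 by omega]
        rw [List.replicate_succ]
      simp [hR]

-- A's per-token step appends the token's chars and its label block
theorem pvStepA_eq (st : List String × List String) (token : String) :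
    (if PySem.Str.len token == 1 then
        (st.1 ++ [((PySem.Str.pyGet? token 0).map Char.toString).getD ""], st.2 ++ ["S"])
      else
        (PySem.List.enumerate token.toList 0).foldl (pvInnerA (PySem.Str.len token)) st)
    = (st.1 ++ token.toList.map Char.toString, st.2 ++ pvBlock token.toList.length) := by
  match hl : token.toList with
  | [] =>
    have hlen : PySem.Str.len token = 0 := by simp [PySem.Str.len, hl]
    simp [hl, PySem.List.enumerate, pvBlock]
  | [c] =>
    have hlen : PySem.Str.len token = 1 := by simp [PySem.Str.len, hl]
    simp [hl, pvBlock]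
  | c :: d :: rest =>
    have hlen : PySem.Str.len token = (2 : Int) + rest.length := by
      simp [PySem.Str.len, hl]; omega
    have hne : (PySem.Str.len token == 1) = false := by
      rw [hlen]; exact beq_eq_false_iff_ne.mpr (by omega)
    rw [hne]
    simp only [Bool.false_eq_true, if_false]
    rw [PySem.List.enumerate_cons, List.foldl_cons]
    have hstep : pvInnerA (PySem.Str.len token) st ((0 : Int), c)
        = (st.1 ++ [c.toString], st.2 ++ ["B"]) := by
      simp [pvInnerA]
    rw [hstep]
    have harg : PySem.Str.len token = ((1 : Nat) : Int) + (d :: rest).length := by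
      rw [hlen]; simp only [List.length_cons]; push_cast; ring
    rw [harg, show ((0 : Int) + 1) = (((1 : Nat)) : Int) by norm_num]
    rw [pvInnerA_tail (d :: rest) 1 _ (le_refl 1) (by simp)]
    have hblock : pvBlock ((c :: d :: rest) : List Char).length
        = "B" :: (List.replicate ((d :: rest).length - 1) "I" ++ ["E"]) := by
      simp [pvBlock]
    rw [hblock]
    simp

-- A computes the canonical result
theorem pvA_eq (ts : List String) :
    tokenize_chars_and_labels ts = (pvCharsOf ts, pvLabelsOf ts) := by
  unfold tokenize_chars_and_labels
  induction ts using List.reverseRecOn with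
  | nil => rfl
  | append_singleton ts t ih =>
    rw [List.foldl_append, List.foldl_cons, List.foldl_nil, ih, pvStepA_eq]
    simp [pvCharsOf, pvLabelsOf]

-- ===== VERDICT (by name: the statement is the Claim_ definition above) =====
theorem tokenize_chars_and_labels_spec : Claim_equal_tokenize_chars_and_labels := by
  intro sentence_tokens _
  unfold Spec_tokenize_chars_and_labels
  rw [pvA_eq, pvB_eq]
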